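-- pv_equiv track=rewrite | github.com/career-prep/ucp-namer-latam-2026 | anny_dang/homework0/q1_ZeroSum_followUp.py | zero_sum2
-- ===== SOURCE A (Python) =====
-- from collections import Counter
--
-- def zero_sum2(nums):
--     """
--     use Counter to count how many times each number appears
--     for zeros -> use combination formula to calculate it
--     iterate through each element
--     if number > 0 -> increase ans by multiplying the counts
--
--     """
--     count = Counter(nums)
--     ans = 0
--     ans += count[0] * (count[0] - 1) // 2
--     for num in count:
--         if num > 0:
--             ans += count[num]*count[-num]
--
--     return ans
-- ===== SOURCE B (Python) =====
-- def zero_sum2(nums):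
--     seen = {}
--     ans = 0
--     for num in nums:
--         ans += seen.get(-num, 0)
--         seen[num] = seen.get(num, 0) + 1
--     return ans
-- ===== Notes on version B (the rewrite author's own statement) =====
-- stated objective: simpler
-- what changed: Replaces the Counter-then-scan-positive-keys combination/product formula by a single incremental pass that, for each element, adds the number of previously seen opposite values and then records the element.
import Mathlib
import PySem

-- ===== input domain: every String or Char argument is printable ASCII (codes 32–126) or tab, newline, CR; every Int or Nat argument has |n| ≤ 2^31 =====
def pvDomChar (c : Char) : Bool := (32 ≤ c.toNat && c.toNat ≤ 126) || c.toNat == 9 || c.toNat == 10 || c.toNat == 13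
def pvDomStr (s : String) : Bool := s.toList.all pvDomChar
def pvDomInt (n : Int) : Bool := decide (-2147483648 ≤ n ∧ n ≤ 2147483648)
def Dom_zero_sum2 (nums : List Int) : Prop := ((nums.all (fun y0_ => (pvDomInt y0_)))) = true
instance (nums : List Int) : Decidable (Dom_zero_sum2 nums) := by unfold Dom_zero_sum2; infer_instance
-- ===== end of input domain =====

-- B replaces A's Counter-plus-positive-key scan by a single incremental pass (simpler); same value everywhere.

-- ===== PORT A =====
def zero_sum2 (nums : List Int) : Int :=
  let count := PySem.Dict.counter nums
  let ans : Int := 0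
  let ans := ans + PySem.Int.floordiv (count.getD 0 0 * (count.getD 0 0 - 1)) 2
  let ans := count.keys.foldl
    (fun ans num => if num > 0 then ans + count.getD num 0 * count.getD (-num) 0 else ans) ans
  ans

-- ===== PORT B =====
def zero_sum2_alt (nums : List Int) : Int :=
  (nums.foldl
    (fun st num => (st.1.insert num (st.1.getD num 0 + 1), st.2 + st.1.getD (-num) 0))
    ((PySem.Dict.empty : PySem.Dict Int Int), (0 : Int))).2

-- ===== PRECONDITION & SPEC =====
def Spec_zero_sum2 (nums : List Int) (out : Int) : Prop := out = zero_sum2_alt nums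
instance (nums : List Int) (out : Int) : Decidable (Spec_zero_sum2 nums out) := by unfold Spec_zero_sum2; infer_instance

-- ===== CLAIM (what is proved, stated in full; the proofs are below) =====
def Claim_equal_zero_sum2 : Prop := ∀ (nums : List Int), Dom_zero_sum2 nums → Spec_zero_sum2 nums (zero_sum2 nums)

-- ===== LEMMAS AND PROOFS =====

-- common abstract value: C(count 0, 2) + Σ over distinct positive values n of count n * count (-n)
def pvS (l : List Int) : Int :=
  PySem.Int.floordiv ((l.count 0 : Int) * ((l.count 0 : Int) - 1)) 2 +
  (((PySem.Set.ofList l).filter (fun n => decide (0 < n))).map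
      (fun n => (l.count n : Int) * (l.count (-n) : Int))).sum

lemma sum_map_update {g g' : Int → Int} : ∀ {s : List Int}, s.Nodup → ∀ {k : Int}, k ∈ s →
    (∀ y ∈ s, y ≠ k → g' y = g y) → (s.map g').sum = (s.map g).sum + (g' k - g k) := by
  intro s
  induction s with
  | nil => intro _ k hk; cases hk
  | cons a t ih =>
    intro hnd k hk hag
    rcases List.nodup_cons.mp hnd with ⟨ha, hndt⟩
    rcases List.mem_cons.mp hk with rfl | hk
    · have : t.map g' = t.map g := by
        apply List.map_congr_left
        intro y hy
        exact hag y (List.mem_cons_of_mem _ hy) (by rintro rfl; exact ha hy)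
      simp [this]; ring
    · have hak : a ≠ k := by rintro rfl; exact ha hk
      have := ih hndt hk (fun y hy hne => hag y (List.mem_cons_of_mem _ hy) hne)
      simp [this, hag a (List.mem_cons_self) hak]; ring

lemma count_append_singleton (l : List Int) (x v : Int) :
    ((l ++ [x]).count v : Int) = (l.count v : Int) + (if v = x then 1 else 0) := by
  by_cases h : v = x
  · simp [List.count_append, h]
  · simp [List.count_append, h, Ne.symm h]

-- the A-side loop is exactly pvS
lemma zero_sum2_eq_pvS (l : List Int) : zero_sum2 l = pvS l := by
  unfold zero_sum2 pvS
  simp only [PySem.Dict.getD_counter, PySem.Dict.keys_counter,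
    PySem.List.foldl_ite_eq_foldl_filter (p := fun n => (0:Int) < n), PySem.List.foldl_add,
    gt_iff_lt, zero_add]

-- the B-side dict component is the running counter
lemma zero_sum2_alt_fst (l : List Int) (d : PySem.Dict Int Int) (a : Int) :
    (l.foldl (fun st num => (st.1.insert num (st.1.getD num 0 + 1), st.2 + st.1.getD (-num) 0))
      (d, a)).1
      = l.foldl (fun d x => d.insert x (d.getD x 0 + 1)) d := by
  induction l generalizing d a with
  | nil => rfl
  | cons x t ih => simp [List.foldl_cons, ih]

lemma zero_sum2_alt_append (l : List Int) (x : Int) :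
    zero_sum2_alt (l ++ [x]) = zero_sum2_alt l + (l.count (-x) : Int) := by
  unfold zero_sum2_alt
  rw [List.foldl_append]
  have h := zero_sum2_alt_fst l (PySem.Dict.empty : PySem.Dict Int Int) 0
  simp only [List.foldl_cons, List.foldl_nil]
  rw [h, PySem.Dict.foldl_insert_getD_add_one_eq_counter, PySem.Dict.getD_counter]

lemma pvS_append (l : List Int) (x : Int) : pvS (l ++ [x]) = pvS l + (l.count (-x) : Int) := by
  unfold pvS
  have hnd : ((PySem.Set.ofList l).filter (fun n => decide (0 < n))).Nodup :=
    (PySem.Set.nodup_ofList l).filter _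
  rw [PySem.Set.ofList_append_singleton, PySem.Set.add_eq_ite]
  rcases lt_trichotomy x 0 with hx | hx | hx
  · -- x < 0 : zero-count and key set of positives unchanged
    have hc0 : ((l ++ [x]).count 0 : Int) = (l.count 0 : Int) := by
      rw [count_append_singleton]; simp [show (0:Int) ≠ x by omega]
    have hfilt : ∀ s : List Int, (if x ∈ s then s else s ++ [x]).filter (fun n => decide (0 < n))
        = s.filter (fun n => decide (0 < n)) := by
      intro s; split <;> simp [List.filter_append, show ¬ (0:Int) < x by omega]
    rw [hfilt, hc0]
    by_cases hmem : -x ∈ l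
    · have hk : -x ∈ (PySem.Set.ofList l).filter (fun n => decide (0 < n)) := by
        simp [List.mem_filter, PySem.Set.mem_ofList, hmem]; omega
      have hag : ∀ y ∈ (PySem.Set.ofList l).filter (fun n => decide (0 < n)), y ≠ -x →
          ((l ++ [x]).count y : Int) * ((l ++ [x]).count (-y) : Int)
            = (l.count y : Int) * (l.count (-y) : Int) := by
        intro y hy hne
        rcases List.mem_filter.mp hy with ⟨_, hy0⟩
        have hy0 : (0:Int) < y := by simpa using hy0
        have h1 : y ≠ x := by omega
        have h2 : -y ≠ x := by intro h; apply hne; omega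
        rw [count_append_singleton, count_append_singleton]
        simp [h1, h2]
      rw [sum_map_update hnd hk hag]
      rw [count_append_singleton, count_append_singleton (v := -(-x))]
      simp [show -x ≠ x by omega, show -(-x) = x from by ring]
      ring
    · have : ∀ y ∈ (PySem.Set.ofList l).filter (fun n => decide (0 < n)),
          ((l ++ [x]).count y : Int) * ((l ++ [x]).count (-y) : Int)
            = (l.count y : Int) * (l.count (-y) : Int) := by
        intro y hy
        rcases List.mem_filter.mp hy with ⟨hys, hy0⟩
        have hy0 : (0:Int) < y := by simpa using hy0
        have h2 : -y ≠ x := by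
          intro h
          exact hmem (by rw [show -x = y by omega]; exact (PySem.Set.mem_ofList _ _).mp hys)
        rw [count_append_singleton, count_append_singleton]
        simp [show y ≠ x by omega, h2]
      rw [List.map_congr_left this]
      simp [List.count_eq_zero.mpr hmem]
  · -- x = 0 : only the zero term changes, by count 0
    subst hx
    have hc0 : ((l ++ [0]).count 0 : Int) = (l.count 0 : Int) + 1 := by
      rw [count_append_singleton]; simp
    have hfilt : (if (0:Int) ∈ PySem.Set.ofList l then PySem.Set.ofList l
          else PySem.Set.ofList l ++ [0]).filter (fun n => decide (0 < n))
        = (PySem.Set.ofList l).filter (fun n => decide (0 < n)) := by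
      split <;> simp [List.filter_append]
    rw [hfilt, hc0]
    have hmap : ∀ y ∈ (PySem.Set.ofList l).filter (fun n => decide (0 < n)),
        ((l ++ [0]).count y : Int) * ((l ++ [0]).count (-y) : Int)
          = (l.count y : Int) * (l.count (-y) : Int) := by
      intro y hy
      rcases List.mem_filter.mp hy with ⟨_, hy0⟩
      have hy0 : (0:Int) < y := by simpa using hy0
      rw [count_append_singleton, count_append_singleton]
      simp [show y ≠ 0 by omega, show -y ≠ 0 by omega]
    rw [List.map_congr_left hmap]
    have hdiv : PySem.Int.floordiv (((l.count 0 : Int) + 1) * ((l.count 0 : Int) + 1 - 1)) 2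
        = PySem.Int.floordiv ((l.count 0 : Int) * ((l.count 0 : Int) - 1)) 2 + (l.count 0 : Int) := by
      rw [PySem.Int.floordiv_eq_ediv_of_pos (by omega), PySem.Int.floordiv_eq_ediv_of_pos (by omega)]
      have : ((l.count 0 : Int) + 1) * ((l.count 0 : Int) + 1 - 1)
          = (l.count 0 : Int) * ((l.count 0 : Int) - 1) + (l.count 0 : Int) * 2 := by ring
      rw [this, Int.add_mul_ediv_right _ _ (by omega : (2:Int) ≠ 0)]
    rw [hdiv]; simp; ring
  · -- 0 < x : only the x term changes (or a new term 1 * count(-x) appears)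
    have hc0 : ((l ++ [x]).count 0 : Int) = (l.count 0 : Int) := by
      rw [count_append_singleton]; simp [show (0:Int) ≠ x by omega]
    rw [hc0]
    have hother : ∀ y ∈ (PySem.Set.ofList l).filter (fun n => decide (0 < n)), y ≠ x →
        ((l ++ [x]).count y : Int) * ((l ++ [x]).count (-y) : Int)
          = (l.count y : Int) * (l.count (-y) : Int) := by
      intro y hy hne
      rcases List.mem_filter.mp hy with ⟨_, hy0⟩
      have hy0 : (0:Int) < y := by simpa using hy0
      rw [count_append_singleton, count_append_singleton]
      simp [hne, show -y ≠ x by omega]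
    by_cases hmem : x ∈ PySem.Set.ofList l
    · have hmeml : x ∈ l := (PySem.Set.mem_ofList _ _).mp hmem
      rw [if_pos hmem]
      have hk : x ∈ (PySem.Set.ofList l).filter (fun n => decide (0 < n)) := by
        simp [List.mem_filter, PySem.Set.mem_ofList, hmeml]; omega
      rw [sum_map_update hnd hk hother]
      rw [count_append_singleton, count_append_singleton (v := -x)]
      simp [show -x ≠ x by omega]
      ring
    · rw [if_neg hmem]
      have hmeml : x ∉ l := fun h => hmem ((PySem.Set.mem_ofList _ _).mpr h)
      rw [List.filter_append]
      have : ([x]).filter (fun n => decide ((0:Int) < n)) = [x] := by simp [hx]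
      rw [this, List.map_append, List.sum_append]
      have hcongr : ∀ y ∈ (PySem.Set.ofList l).filter (fun n => decide (0 < n)),
          ((l ++ [x]).count y : Int) * ((l ++ [x]).count (-y) : Int)
            = (l.count y : Int) * (l.count (-y) : Int) := by
        intro y hy
        apply hother y hy
        rintro rfl
        exact hmem (List.mem_filter.mp hy).1
      rw [List.map_congr_left hcongr]
      have hx1 : ((l ++ [x]).count x : Int) = 1 := by
        rw [count_append_singleton]; simp [List.count_eq_zero.mpr hmeml]
      have hx2 : ((l ++ [x]).count (-x) : Int) = (l.count (-x) : Int) := by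
        rw [count_append_singleton]; simp [show -x ≠ x by omega]
      simp [List.count_eq_zero.mpr hmeml, List.count_singleton]
      rw [if_neg (show ¬ x = -x by omega)]
      ring

lemma zero_sum2_alt_eq_pvS (l : List Int) : zero_sum2_alt l = pvS l := by
  induction l using List.reverseRecOn with
  | nil => decide
  | append_singleton t x ih => rw [zero_sum2_alt_append, pvS_append, ih]

-- ===== VERDICT (by name: the statement is the Claim_ definition above) =====
theorem zero_sum2_spec : Claim_equal_zero_sum2 := by
  intro nums _
  unfold Spec_zero_sum2
  rw [zero_sum2_eq_pvS, zero_sum2_alt_eq_pvS]
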